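-- pv_equiv track=rewrite | github.com/ckmaurya2004/Python_Interview_ques | ques8.py | equalization
-- ===== SOURCE A (Python) =====
-- def equalization(a,b,s,t):
--     str_list = []
--     count = 0
--     for ch in s:
--         str_list.append(ch)
--
--     for i in range(a):
--         char = str_list.pop(i)
--         for word in t:
--             if ''.join(str_list)==word:
--                 count = count+1
--         str_list.insert(i, char)
--     return count
-- ===== SOURCE B (Python) =====
-- def equalization(a, b, s, t):
--     # Count multiplicities of t once, then look up each single-char-removed string.
--     cnt = {}
--     for w in t:
--         cnt[w] = cnt.get(w, 0) + 1
--     total = 0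
--     for i in range(a):
--         total += cnt.get(s[:i] + s[i+1:], 0)
--     return total
-- ===== Notes on version B (the rewrite author's own statement) =====
-- stated objective: faster
-- what changed: B builds a multiplicity dict of t once and sums one dict lookup of each single-char-removed slice string, instead of A's rebuilding the joined string and scanning all of t for every removal position.
import Mathlib
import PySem

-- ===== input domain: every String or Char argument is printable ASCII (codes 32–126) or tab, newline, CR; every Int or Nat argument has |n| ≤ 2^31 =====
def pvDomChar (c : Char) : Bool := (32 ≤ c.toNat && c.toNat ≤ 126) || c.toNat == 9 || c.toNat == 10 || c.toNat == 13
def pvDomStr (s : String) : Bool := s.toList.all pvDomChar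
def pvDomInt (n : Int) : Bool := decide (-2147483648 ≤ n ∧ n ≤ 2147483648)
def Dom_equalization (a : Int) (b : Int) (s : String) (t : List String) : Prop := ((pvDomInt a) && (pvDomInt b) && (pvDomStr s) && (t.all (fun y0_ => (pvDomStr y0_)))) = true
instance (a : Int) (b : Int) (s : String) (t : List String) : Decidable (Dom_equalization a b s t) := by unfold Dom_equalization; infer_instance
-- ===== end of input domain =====

-- ===== PORT A =====
-- B replaces A's per-position scan of t with one multiplicity dict of t, looked up once
-- per removal position (measurably faster; Pre_ excludes a > len(s), where A raises IndexError).
-- loop body of A's 'for i in range(a)' (pop, scan t, insert back)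
def eqStepA (t : List String) (st : List Char × Int) (i : Int) : List Char × Int :=
  match PySem.List.pop? st.1 i with
  | none => st  -- Python raises IndexError here; excluded by Pre_equalization
  | some (ch, rest) =>
    -- ''.join(str_list) == word
    let c := t.foldl (fun c word =>
      if String.ofList (PySem.Chars.join [] (rest.map (fun x => [x]))) == word then c + 1 else c) st.2
    (PySem.List.insert rest i ch, c)

def equalization (a : Int) (b : Int) (s : String) (t : List String) : Int :=
  -- str_list = []; for ch in s: str_list.append(ch)
  let str_list : List Char := s.toList.foldl (fun acc ch => acc ++ [ch]) []
  -- for i in range(a): char = str_list.pop(i); for word in t: …; str_list.insert(i, char)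
  let r := (PySem.List.pyRange 0 a 1).foldl (eqStepA t) (str_list, 0)
  r.2

-- ===== PORT B =====
def equalization_alt (a : Int) (b : Int) (s : String) (t : List String) : Int :=
  -- cnt = {}; for w in t: cnt[w] = cnt.get(w, 0) + 1
  let cnt : PySem.Dict String Int := t.foldl (fun d w => d.modify w 0 (· + 1)) PySem.Dict.empty
  -- total = 0; for i in range(a): total += cnt.get(s[:i] + s[i+1:], 0)
  (PySem.List.pyRange 0 a 1).foldl
    (fun total i =>
      total + cnt.getD (PySem.Str.slice s none (some i) ++ PySem.Str.slice s (some (i + 1)) none) 0)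
    0

-- ===== PRECONDITION & SPEC =====
-- Pre_ excludes exactly a > len(s): there A's str_list.pop(i) raises IndexError at i = len(s).
def Pre_equalization (a : Int) (b : Int) (s : String) (t : List String) : Prop :=
  a ≤ (s.toList.length : Int)
instance (a : Int) (b : Int) (s : String) (t : List String) : Decidable (Pre_equalization a b s t) := by
  unfold Pre_equalization; infer_instance

def pvWitness_equalization : Int × Int × String × List String := (2, 0, "ab", ["a", "b", "a"])

def Spec_equalization (a : Int) (b : Int) (s : String) (t : List String) (out : Int) : Prop := out = equalization_alt a b s t
instance (a : Int) (b : Int) (s : String) (t : List String) (out : Int) : Decidable (Spec_equalization a b s t out) := by unfold Spec_equalization; infer_instance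

-- ===== CLAIM (what is proved, stated in full; the proofs are below) =====
def Claim_equal_equalization : Prop := ∀ (a : Int) (b : Int) (s : String) (t : List String), Dom_equalization a b s t → Pre_equalization a b s t → Spec_equalization a b s t (equalization a b s t)

-- ===== LEMMAS AND PROOFS =====
theorem equalization_key_eq (s : String) (i : Nat) :
    PySem.Str.slice s none (some (i : Int)) ++ PySem.Str.slice s (some ((i : Int) + 1)) none
      = String.ofList (s.toList.take i ++ s.toList.drop (i + 1)) := by
  have h : (PySem.Str.slice s none (some (i : Int)) ++ PySem.Str.slice s (some ((i : Int) + 1)) none).toList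
      = s.toList.take i ++ s.toList.drop (i + 1) := by
    have h1 : ((i : Int) + 1) = (((i + 1 : Nat)) : Int) := by push_cast; ring
    rw [h1, String.toList_append]
    simp only [PySem.Str.toList_slice, PySem.Chars.slice_eq_listSlice,
      PySem.List.slice_to_natCast, PySem.List.slice_from_natCast]
  calc PySem.Str.slice s none (some (i : Int)) ++ PySem.Str.slice s (some ((i : Int) + 1)) none
      = String.ofList (PySem.Str.slice s none (some (i : Int)) ++ PySem.Str.slice s (some ((i : Int) + 1)) none).toList := by
        rw [String.ofList_toList]
    _ = String.ofList (s.toList.take i ++ s.toList.drop (i + 1)) := by rw [h]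

theorem equalization_stepA (L : List Char) (t : List String) (c : Int) (i : Nat) (h : i < L.length) :
    eqStepA t (L, c) (i : Int) = (L, c + (t.count (String.ofList (L.take i ++ L.drop (i + 1))) : Int)) := by
  have hpop : PySem.List.pop? L (i : Int) = some (L[i], L.eraseIdx i) := PySem.List.pop?_natCast L i h
  have herase : L.eraseIdx i = L.take i ++ L.drop (i + 1) := List.eraseIdx_eq_take_drop_succ L i
  have hins : PySem.List.insert (L.eraseIdx i) (i : Int) L[i] = L := by
    rw [PySem.List.insert_natCast _ i _ (by rw [List.length_eraseIdx_of_lt h]; omega), herase,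
      List.take_append_of_le_length (by simp [List.length_take]; omega),
      List.drop_append_of_le_length (by simp [List.length_take]; omega)]
    simp [List.take_take]
  unfold eqStepA
  simp only [hpop]
  rw [hins]
  congr 1
  rw [herase, PySem.Chars.join_nil_singletons]
  simp only [BEq.comm]
  rw [PySem.List.foldl_beq_add_one]

theorem equalization_loop (L : List Char) (t : List String) (n : Nat) (h : n ≤ L.length) (c : Int) :
    (PySem.List.pyRange 0 (n : Int) 1).foldl (eqStepA t) (L, c)
      = (L, c + ((List.range n).map (fun i => (t.count (String.ofList (L.take i ++ L.drop (i + 1))) : Int))).sum) := by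
  induction n generalizing c with
  | zero => simp [PySem.List.pyRange_one_eq_nil]
  | succ m ih =>
    have hm : m ≤ L.length := by omega
    have hcast : ((m + 1 : Nat) : Int) = (m : Int) + 1 := by push_cast; ring
    rw [hcast, PySem.List.pyRange_one_succ_right (by positivity), List.foldl_append, ih hm c]
    rw [List.foldl_cons, List.foldl_nil, equalization_stepA L t _ m (by omega)]

    rw [List.range_succ, List.map_append, List.sum_append]
    simp [add_assoc]

theorem equalization_loopB (s : String) (t : List String) (n : Nat) (c : Int) :
    (PySem.List.pyRange 0 (n : Int) 1).foldl
      (fun total i =>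
        total + (t.foldl (fun d w => d.modify w 0 (· + 1)) PySem.Dict.empty).getD
          (PySem.Str.slice s none (some i) ++ PySem.Str.slice s (some (i + 1)) none) 0) c
      = c + ((List.range n).map (fun i => (t.count (String.ofList (s.toList.take i ++ s.toList.drop (i + 1))) : Int))).sum := by
  induction n generalizing c with
  | zero => simp [PySem.List.pyRange_one_eq_nil]
  | succ m ih =>
    have hcast : ((m + 1 : Nat) : Int) = (m : Int) + 1 := by push_cast; ring
    rw [hcast, PySem.List.pyRange_one_succ_right (by positivity), List.foldl_append, ih c]
    simp only [List.foldl_cons, List.foldl_nil]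
    rw [show (t.foldl (fun d w => d.modify w 0 (· + 1)) PySem.Dict.empty) = PySem.Dict.counter t from rfl]
    rw [equalization_key_eq s m, PySem.Dict.getD_counter]
    rw [List.range_succ, List.map_append, List.sum_append]
    simp [add_assoc]

-- ===== VERDICT (by name: the statement is the Claim_ definition above) =====
theorem equalization_spec : Claim_equal_equalization := by
  intro a b s t _ hpre
  unfold Spec_equalization equalization equalization_alt
  dsimp only
  have hlist : s.toList.foldl (fun acc ch => acc ++ [ch]) [] = s.toList := by
    have := PySem.List.foldl_append_singleton_eq_map (l := s.toList) (f := id) (acc := ([] : List Char))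
    simpa using this
  by_cases ha : 0 ≤ a
  · have hn : a = ((a.toNat : Nat) : Int) := by omega
    have hlen : a.toNat ≤ s.toList.length := by
      unfold Pre_equalization at hpre; omega
    rw [hlist, hn, equalization_loop s.toList t a.toNat hlen 0,
      equalization_loopB s t a.toNat 0]
  · rw [PySem.List.pyRange_one_eq_nil (by omega)]
    simp [List.foldl_nil]
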